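-- pv_equiv track=rewrite | github.com/HaochenLiu2000/MoRA | find_pruned_path.py | find_paths_in_subgraph
-- ===== SOURCE A (Python) =====
-- def find_paths_in_subgraph(subgraph_triplets, query_entities, answer_entities, max_hops):
--
--     adjacency = {}
--     for idx, (h, _, t) in enumerate(subgraph_triplets):
--         if h not in adjacency:
--             adjacency[h] = []
--         if t not in adjacency:
--             adjacency[t] = []
--         adjacency[h].append((t, idx))
--         adjacency[t].append((h, idx))
--
--     positive_entities = set()
--     positive_triplet_indices = set()
--
--     def dfs(current_entity, visited_entities, visited_triplets, depth):
--         if depth > max_hops: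
--             return False
--         if current_entity in answer_entities:
--             positive_entities.update(visited_entities)
--             positive_triplet_indices.update(visited_triplets)
--             return True
--
--         found = False
--         for neighbor_tuple in adjacency.get(current_entity, []):
--             neighbor, triplet_idx = neighbor_tuple
--             if triplet_idx not in visited_triplets:
--                 if dfs(
--                     neighbor,
--                     visited_entities | {neighbor},
--                     visited_triplets | {triplet_idx},
--                     depth + 1
--                 ):
--                     found = True
--         return found
--
--     for query_entity in query_entities:
--         dfs(query_entity, {query_entity}, set(), 0)
--
--     return positive_entities, positive_triplet_indices
-- ===== SOURCE B (Python) =====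
-- def find_paths_in_subgraph(subgraph_triplets, query_entities, answer_entities, max_hops):
--
--     adjacency = {}
--     for idx, (h, _, t) in enumerate(subgraph_triplets):
--         if h not in adjacency:
--             adjacency[h] = []
--         if t not in adjacency:
--             adjacency[t] = []
--         adjacency[h].append((t, idx))
--         adjacency[t].append((h, idx))
--
--     positive_entities = set()
--     positive_triplet_indices = set()
--
--     for query_entity in query_entities:
--         stack = [(query_entity, {query_entity}, set(), 0)]
--         while stack:
--             entity, visited_entities, visited_triplets, depth = stack.pop()
--             if depth > max_hops:
--                 continue
--             if entity in answer_entities: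
--                 positive_entities.update(visited_entities)
--                 positive_triplet_indices.update(visited_triplets)
--                 continue
--             for neighbor, triplet_idx in reversed(adjacency.get(entity, [])):
--                 if triplet_idx not in visited_triplets:
--                     stack.append((neighbor,
--                                   visited_entities | {neighbor},
--                                   visited_triplets | {triplet_idx},
--                                   depth + 1))
--
--     return positive_entities, positive_triplet_indices
-- ===== Notes on version B (the rewrite author's own statement) =====
-- stated objective: alternative
-- what changed: The recursive nested dfs (Python call stack, closure over the accumulator sets) is replaced by an iterative DFS with an explicit frame stack: frames (entity, visited_entities, visited_triplets, depth) are pushed in reversed neighbor order and popped in a while loop, so recursion disappears while the visit order and the returned sets are preserved.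
import Mathlib
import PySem

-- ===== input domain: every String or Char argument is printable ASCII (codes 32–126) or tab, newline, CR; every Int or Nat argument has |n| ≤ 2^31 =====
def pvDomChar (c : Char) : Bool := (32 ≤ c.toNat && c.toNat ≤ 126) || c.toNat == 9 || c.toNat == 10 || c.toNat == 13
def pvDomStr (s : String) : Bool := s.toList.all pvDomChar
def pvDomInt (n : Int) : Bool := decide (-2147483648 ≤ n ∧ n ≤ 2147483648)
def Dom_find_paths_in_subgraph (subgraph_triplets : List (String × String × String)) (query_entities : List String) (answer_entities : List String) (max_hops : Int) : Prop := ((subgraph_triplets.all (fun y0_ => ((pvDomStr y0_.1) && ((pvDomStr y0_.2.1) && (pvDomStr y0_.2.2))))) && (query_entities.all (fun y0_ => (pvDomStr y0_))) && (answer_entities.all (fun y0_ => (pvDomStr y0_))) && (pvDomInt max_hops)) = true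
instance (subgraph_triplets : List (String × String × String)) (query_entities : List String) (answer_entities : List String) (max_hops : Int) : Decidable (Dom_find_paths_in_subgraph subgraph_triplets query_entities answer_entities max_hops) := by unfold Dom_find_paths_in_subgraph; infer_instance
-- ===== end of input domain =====

-- B replaces A's recursive nested DFS by an explicit-stack iterative DFS (same visit order, no recursion);
-- both build the same adjacency dict, and neither mutates its arguments.

-- ===== PORT A =====

-- adjacency-building loop (textually identical in Source A and Source B; shared helper)
def pvAdj (subgraph_triplets : List (String × String × String)) : PySem.Dict String (List (String × Int)) :=
  (PySem.List.enumerate subgraph_triplets).foldl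
    (fun adjacency p =>
      let idx := p.1
      let h := p.2.1
      let t := p.2.2.2
      let adjacency := if adjacency.contains h then adjacency else adjacency.insert h []
      let adjacency := if adjacency.contains t then adjacency else adjacency.insert t []
      let adjacency := adjacency.modify h [] (fun l => l ++ [(t, idx)])
      adjacency.modify t [] (fun l => l ++ [(h, idx)]))
    PySem.Dict.empty

-- A's inner recursive 'dfs'; Python's recursion becomes well-founded recursion on the
-- remaining depth budget (max_hops + 1 - depth), which the 'depth > max_hops' guard bounds
def pvDfsA (adj : PySem.Dict String (List (String × Int))) (answer_entities : List String)
    (max_hops : Int) (current_entity : String) (visited_entities : PySem.Set String)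
    (visited_triplets : PySem.Set Int) (depth : Int)
    (pos : PySem.Set String × PySem.Set Int) :
    (PySem.Set String × PySem.Set Int) × Bool :=
  if _h : depth > max_hops then (pos, false)
  else if current_entity ∈ answer_entities then
    ((PySem.Set.update pos.1 visited_entities, PySem.Set.update pos.2 visited_triplets), true)
  else
    (adj.getD current_entity []).foldl
      (fun st nb =>
        if nb.2 ∈ visited_triplets then st
        else
          let r := pvDfsA adj answer_entities max_hops nb.1
            (PySem.Set.union visited_entities [nb.1])
            (PySem.Set.union visited_triplets [nb.2]) (depth + 1) st.1
          (r.1, st.2 || r.2))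
      (pos, false)
termination_by (max_hops + 1 - depth).toNat
decreasing_by omega

def find_paths_in_subgraph (subgraph_triplets : List (String × String × String)) (query_entities : List String) (answer_entities : List String) (max_hops : Int) : List String × List Int :=
  let adjacency := pvAdj subgraph_triplets
  query_entities.foldl
    (fun pos query_entity =>
      (pvDfsA adjacency answer_entities max_hops query_entity
        (PySem.Set.ofList [query_entity]) PySem.Set.empty 0 pos).1)
    (PySem.Set.empty, PySem.Set.empty)

-- ===== PORT B =====

-- termination measure for B's 'while stack:' loop: a frame at depth d weighs
-- (maxdeg+1)^(max_hops+1-d); popping a frame and pushing its ≤ maxdeg children shrinks the sum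
def pvMaxDeg (adj : PySem.Dict String (List (String × Int))) : Nat :=
  ((adj.values).map List.length).foldl Nat.max 0

theorem pv_init_le_foldl_max (l : List Nat) : ∀ (a : Nat), a ≤ l.foldl Nat.max a := by
  induction l with
  | nil => intro a; simp
  | cons y l ih => intro a; exact le_trans (Nat.le_max_left a y) (ih _)

theorem pv_le_foldl_max (l : List Nat) : ∀ (a x : Nat), x ∈ l → x ≤ l.foldl Nat.max a := by
  induction l with
  | nil => intro a x hx; cases hx
  | cons y l ih =>
    intro a x hx
    rcases List.mem_cons.mp hx with rfl | hx
    · exact le_trans (Nat.le_max_right a x) (pv_init_le_foldl_max l _)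
    · exact ih _ _ hx

theorem pv_mem_values_of_get? (items : List (String × List (String × Int))) (k : String)
    (v : List (String × Int)) (h : (PySem.Dict.mk items).get? k = some v) :
    v ∈ (PySem.Dict.mk items).values := by
  induction items with
  | nil => simp [PySem.Dict.get?] at h
  | cons p rest ih =>
    rw [PySem.Dict.get?_mk_cons] at h
    by_cases hk : p.1 == k
    · simp [hk] at h
      simp [PySem.Dict.values, h]
    · simp [hk] at h
      have := ih h
      simp [PySem.Dict.values] at this ⊢
      exact Or.inr this

theorem pvGetD_len_le (adj : PySem.Dict String (List (String × Int))) (e : String) :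
    (adj.getD e []).length ≤ pvMaxDeg adj := by
  rw [PySem.Dict.getD_eq_get?_getD]
  cases hg : adj.get? e with
  | none => simp
  | some v =>
    obtain ⟨items⟩ := adj
    have hv := pv_mem_values_of_get? items e v hg
    simp only [Option.getD]
    exact pv_le_foldl_max _ 0 _ (List.mem_map_of_mem hv)

def pvPot (B : Nat) (m d : Int) : Nat := (B + 1) ^ (m + 1 - d).toNat

def pvMeas (B : Nat) (m : Int)
    (st : List (String × PySem.Set String × PySem.Set Int × Int)) : Nat :=
  (st.map (fun f => pvPot B m f.2.2.2)).sum

theorem pvMeas_push_le (B : Nat) (m depth : Int) (ve : PySem.Set String) (vt : PySem.Set Int) :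
    ∀ (l : List (String × Int)) (rest : List (String × PySem.Set String × PySem.Set Int × Int)),
      pvMeas B m (l.foldl
          (fun s nb =>
            if nb.2 ∈ vt then s
            else (nb.1, PySem.Set.union ve [nb.1],
                  PySem.Set.union vt [nb.2], depth + 1) :: s)
          rest)
        ≤ pvMeas B m rest + l.length * pvPot B m (depth + 1) := by
  intro l
  induction l with
  | nil => intro rest; simp
  | cons nb l ih =>
    intro rest
    simp only [List.foldl_cons]
    by_cases hc : nb.2 ∈ vt
    · simp only [if_pos hc]
      calc _ ≤ pvMeas B m rest + l.length * pvPot B m (depth + 1) := ih rest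
        _ ≤ _ := by simp only [List.length_cons]; nlinarith
    · simp only [if_neg hc]
      calc _ ≤ pvMeas B m ((nb.1, PySem.Set.union ve [nb.1],
                  PySem.Set.union vt [nb.2], depth + 1) :: rest)
                + l.length * pvPot B m (depth + 1) := ih _
        _ = pvMeas B m rest + pvPot B m (depth + 1) + l.length * pvPot B m (depth + 1) := by
              simp [pvMeas]; ring
        _ ≤ _ := by simp only [List.length_cons]; nlinarith

-- B's 'while stack:' loop (stack top = list head; pushing reversed(adjacency) keeps A's visit order)
def pvLoopB (adj : PySem.Dict String (List (String × Int))) (answer_entities : List String)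
    (max_hops : Int) :
    List (String × PySem.Set String × PySem.Set Int × Int) →
    (PySem.Set String × PySem.Set Int) → (PySem.Set String × PySem.Set Int)
  | [], pos => pos
  | (entity, visited_entities, visited_triplets, depth) :: rest, pos =>
    if _h : depth > max_hops then pvLoopB adj answer_entities max_hops rest pos
    else if entity ∈ answer_entities then
      pvLoopB adj answer_entities max_hops rest
        (PySem.Set.update pos.1 visited_entities, PySem.Set.update pos.2 visited_triplets)
    else
      pvLoopB adj answer_entities max_hops
        ((adj.getD entity []).reverse.foldl
          (fun s nb =>
            if nb.2 ∈ visited_triplets then s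
            else (nb.1, PySem.Set.union visited_entities [nb.1],
                  PySem.Set.union visited_triplets [nb.2], depth + 1) :: s)
          rest) pos
termination_by st _ => pvMeas (pvMaxDeg adj) max_hops st
decreasing_by
  · simp only [pvMeas, List.map_cons, List.sum_cons]
    have hp : 0 < pvPot (pvMaxDeg adj) max_hops depth := by unfold pvPot; positivity
    omega
  · simp only [pvMeas, List.map_cons, List.sum_cons]
    have hp : 0 < pvPot (pvMaxDeg adj) max_hops depth := by unfold pvPot; positivity
    omega
  · simp only [dite_eq_ite]
    have hle := pvMeas_push_le (pvMaxDeg adj) max_hops depth visited_entities visited_triplets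
      (adj.getD entity []).reverse rest
    have hlen : (adj.getD entity []).reverse.length ≤ pvMaxDeg adj := by
      rw [List.length_reverse]; exact pvGetD_len_le adj entity
    have hk : (max_hops + 1 - depth).toNat = (max_hops + 1 - (depth + 1)).toNat + 1 := by omega
    have hpot : (adj.getD entity []).reverse.length * pvPot (pvMaxDeg adj) max_hops (depth + 1)
        < pvPot (pvMaxDeg adj) max_hops depth := by
      unfold pvPot
      rw [hk, pow_succ]
      have hx : 0 < (pvMaxDeg adj + 1) ^ (max_hops + 1 - (depth + 1)).toNat := by positivity
      nlinarith
    simp only [pvMeas, List.map_cons, List.sum_cons] at hle hpot ⊢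
    omega

def find_paths_in_subgraph_alt (subgraph_triplets : List (String × String × String)) (query_entities : List String) (answer_entities : List String) (max_hops : Int) : List String × List Int :=
  let adjacency := pvAdj subgraph_triplets
  query_entities.foldl
    (fun pos query_entity =>
      pvLoopB adjacency answer_entities max_hops
        [(query_entity, PySem.Set.ofList [query_entity], PySem.Set.empty, 0)] pos)
    (PySem.Set.empty, PySem.Set.empty)

-- ===== PRECONDITION & SPEC =====
def Spec_find_paths_in_subgraph (subgraph_triplets : List (String × String × String)) (query_entities : List String) (answer_entities : List String) (max_hops : Int) (out : List String × List Int) : Prop := out = find_paths_in_subgraph_alt subgraph_triplets query_entities answer_entities max_hops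
instance (subgraph_triplets : List (String × String × String)) (query_entities : List String) (answer_entities : List String) (max_hops : Int) (out : List String × List Int) : Decidable (Spec_find_paths_in_subgraph subgraph_triplets query_entities answer_entities max_hops out) := by unfold Spec_find_paths_in_subgraph; infer_instance

-- ===== CLAIM (what is proved, stated in full; the proofs are below) =====
def Claim_equal_find_paths_in_subgraph : Prop := ∀ (subgraph_triplets : List (String × String × String)) (query_entities : List String) (answer_entities : List String) (max_hops : Int), Dom_find_paths_in_subgraph subgraph_triplets query_entities answer_entities max_hops → Spec_find_paths_in_subgraph subgraph_triplets query_entities answer_entities max_hops (find_paths_in_subgraph subgraph_triplets query_entities answer_entities max_hops)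

-- ===== LEMMAS AND PROOFS =====

-- the simulation: popping one frame and draining the stack equals running A's dfs on that
-- frame first and then draining the rest of the stack
theorem pvLoop_cons (adj : PySem.Dict String (List (String × Int)))
    (answer_entities : List String) (max_hops : Int) :
    ∀ (r : Nat) (depth : Int), (max_hops + 1 - depth).toNat = r →
    ∀ (e : String) (ve : PySem.Set String) (vt : PySem.Set Int)
      (rest : List (String × PySem.Set String × PySem.Set Int × Int))
      (pos : PySem.Set String × PySem.Set Int),
      pvLoopB adj answer_entities max_hops ((e, ve, vt, depth) :: rest) pos
        = pvLoopB adj answer_entities max_hops rest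
            (pvDfsA adj answer_entities max_hops e ve vt depth pos).1 := by
  intro r
  induction r with
  | zero =>
    intro depth hr e ve vt rest pos
    have hd : depth > max_hops := by omega
    rw [pvLoopB, pvDfsA]
    simp [hd]
  | succ r ih =>
    intro depth hr e ve vt rest pos
    have hd : ¬ depth > max_hops := by omega
    rw [pvLoopB, pvDfsA]
    simp only [dif_neg hd]
    by_cases ha : e ∈ answer_entities
    · simp [ha]
    · simp only [if_neg ha]
      rw [List.foldl_reverse]
      have aux : ∀ (l : List (String × Int))
          (rest : List (String × PySem.Set String × PySem.Set Int × Int))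
          (pos : PySem.Set String × PySem.Set Int) (b : Bool),
          pvLoopB adj answer_entities max_hops
            (l.foldr (fun nb s =>
              if nb.2 ∈ vt then s
              else (nb.1, PySem.Set.union ve [nb.1],
                    PySem.Set.union vt [nb.2], depth + 1) :: s) rest) pos
          = pvLoopB adj answer_entities max_hops rest
              (l.foldl (fun st nb =>
                if nb.2 ∈ vt then st
                else
                  let r := pvDfsA adj answer_entities max_hops nb.1
                    (PySem.Set.union ve [nb.1]) (PySem.Set.union vt [nb.2]) (depth + 1) st.1
                  (r.1, st.2 || r.2)) (pos, b)).1 := by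
        intro l
        induction l with
        | nil => intro rest pos b; rfl
        | cons nb l ihl =>
          intro rest pos b
          simp only [List.foldr_cons, List.foldl_cons]
          by_cases hc : nb.2 ∈ vt
          · simp only [if_pos hc]
            exact ihl rest pos b
          · simp only [if_neg hc]
            rw [ih (depth + 1) (by omega) nb.1 (PySem.Set.union ve [nb.1])
              (PySem.Set.union vt [nb.2]) _ pos]
            exact ihl rest _ _
      exact aux (adj.getD e []) rest pos false

theorem pvLoopB_nil (adj : PySem.Dict String (List (String × Int)))
    (answer_entities : List String) (max_hops : Int)
    (pos : PySem.Set String × PySem.Set Int) :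
    pvLoopB adj answer_entities max_hops [] pos = pos := by
  rw [pvLoopB]

-- ===== VERDICT (by name: the statement is the Claim_ definition above) =====
theorem find_paths_in_subgraph_spec : Claim_equal_find_paths_in_subgraph := by
  unfold Claim_equal_find_paths_in_subgraph
  intro subgraph_triplets query_entities answer_entities max_hops _dom
  unfold Spec_find_paths_in_subgraph find_paths_in_subgraph find_paths_in_subgraph_alt
  apply List.foldl_ext
  intro pos q _hq
  rw [pvLoop_cons (pvAdj subgraph_triplets) answer_entities max_hops
    (max_hops + 1 - 0).toNat 0 rfl q (PySem.Set.ofList [q]) PySem.Set.empty [] pos,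
    pvLoopB_nil]
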